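-- pv_equiv track=rewrite | github.com/Devin-Cooper/RLCD | simulator/rendering/vector_font.py | get_string_width
-- ===== SOURCE A (Python) =====
-- def _get_char_width(char: str, char_width: int) -> int:
--     """
--     Get the actual width for a character.
--
--     Args:
--         char: The character
--         char_width: The base character width
--
--     Returns:
--         The actual width for the character
--     """
--     if char == ':':
--         return char_width // 2
--     elif char == '.':
--         return char_width // 3
--     elif char == '-':
--         return char_width * 2 // 3
--     elif char == '/':
--         return char_width // 2
--     elif char == '°':
--         return char_width // 3
--     elif char == '%':
--         return char_width
--     elif char == ' ':
--         return char_width // 2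
--     else:
--         return char_width
--
-- def get_string_width(
--     text: str,
--     char_width: int,
--     spacing: int = 4
-- ) -> int:
--     """
--     Calculate the total width of a rendered string.
--
--     Args:
--         text: String to measure
--         char_width: Width of each character bounding box
--         spacing: Horizontal spacing between characters (default 4)
--
--     Returns:
--         Total width in pixels
--     """
--     if not text:
--         return 0
--
--     total_width = 0
--
--     for i, char in enumerate(text):
--         total_width += _get_char_width(char, char_width)
--
--         # Add spacing after each character except the last
--         if i < len(text) - 1:
--             total_width += spacing
--
--     return total_width
-- ===== SOURCE B (Python) =====
-- def get_string_width(text, char_width, spacing=4):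
--     """Closed form: assume every character has full width, then subtract a
--     deduction per special character counted with str.count, plus spacing once
--     as spacing * (len(text) - 1).  No per-character width lookup pass."""
--     if not text:
--         return 0
--     n = len(text)
--     total = char_width * n + spacing * (n - 1)
--     for ch, w in ((':', char_width // 2),
--                   ('.', char_width // 3),
--                   ('-', char_width * 2 // 3),
--                   ('/', char_width // 2),
--                   ('°', char_width // 3),
--                   ('%', char_width),
--                   (' ', char_width // 2)):
--         total -= text.count(ch) * (char_width - w)
--     return total
-- ===== Notes on version B (the rewrite author's own statement) =====
-- stated objective: faster
-- what changed: Replaces A's per-character width loop with a closed form: full width char_width*len plus spacing*(len-1), minus a counted deduction text.count(ch)*(char_width-w) for each of the seven special characters (counting done by C-level str.count instead of an interpreted per-character pass).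
import Mathlib
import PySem

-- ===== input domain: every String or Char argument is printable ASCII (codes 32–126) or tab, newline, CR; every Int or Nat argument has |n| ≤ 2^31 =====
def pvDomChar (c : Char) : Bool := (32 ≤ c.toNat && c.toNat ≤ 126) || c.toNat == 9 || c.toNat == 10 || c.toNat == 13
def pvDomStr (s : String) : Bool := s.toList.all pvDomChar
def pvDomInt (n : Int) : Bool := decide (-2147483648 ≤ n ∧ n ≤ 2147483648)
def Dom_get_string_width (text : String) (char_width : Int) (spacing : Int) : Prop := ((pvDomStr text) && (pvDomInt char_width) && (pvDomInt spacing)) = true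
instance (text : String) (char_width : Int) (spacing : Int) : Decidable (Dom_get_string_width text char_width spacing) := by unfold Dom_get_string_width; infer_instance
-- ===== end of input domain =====

-- B replaces A's per-character width loop by a closed form (char_width*len + spacing*(len-1))
-- minus a counted deduction per special character; same values, an alternative decomposition.


-- ===== PORT A =====
-- _get_char_width: the if/elif chain, in source order
def pvCharWidthA (c : Char) (char_width : Int) : Int :=
  if c = ':' then PySem.Int.floordiv char_width 2
  else if c = '.' then PySem.Int.floordiv char_width 3
  else if c = '-' then PySem.Int.floordiv (char_width * 2) 3
  else if c = '/' then PySem.Int.floordiv char_width 2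
  else if c = '°' then PySem.Int.floordiv char_width 3
  else if c = '%' then char_width
  else if c = ' ' then PySem.Int.floordiv char_width 2
  else char_width

def get_string_width (text : String) (char_width : Int) (spacing : Int) : Int :=
  if text.toList = [] then 0
  else
    (PySem.List.enumerate text.toList 0).foldl
      (fun total_width p =>
        let total_width := total_width + pvCharWidthA p.2 char_width
        if p.1 < (text.toList.length : Int) - 1 then total_width + spacing else total_width)
      0

-- ===== PORT B =====
-- the literal tuple of (special char, its width) pairs from Source B
def pvSpecials (char_width : Int) : List (Char × Int) :=
  [ (':', PySem.Int.floordiv char_width 2),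
    ('.', PySem.Int.floordiv char_width 3),
    ('-', PySem.Int.floordiv (char_width * 2) 3),
    ('/', PySem.Int.floordiv char_width 2),
    ('°', PySem.Int.floordiv char_width 3),
    ('%', char_width),
    (' ', PySem.Int.floordiv char_width 2) ]

-- text.count(ch) on a single-character needle is ported as List.count on the chars (exact there)
def get_string_width_alt (text : String) (char_width : Int) (spacing : Int) : Int :=
  if text.toList = [] then 0
  else
    let n : Int := (text.toList.length : Int)
    (pvSpecials char_width).foldl
      (fun total p => total - (text.toList.count p.1 : Int) * (char_width - p.2))
      (char_width * n + spacing * (n - 1))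

-- ===== PRECONDITION & SPEC =====
def Spec_get_string_width (text : String) (char_width : Int) (spacing : Int) (out : Int) : Prop := out = get_string_width_alt text char_width spacing
instance (text : String) (char_width : Int) (spacing : Int) (out : Int) : Decidable (Spec_get_string_width text char_width spacing out) := by unfold Spec_get_string_width; infer_instance

-- ===== CLAIM =====
def Claim_equal_get_string_width : Prop := ∀ (text : String) (char_width : Int) (spacing : Int), Dom_get_string_width text char_width spacing → Spec_get_string_width text char_width spacing (get_string_width text char_width spacing)

-- ===== LEMMAS AND PROOFS =====

-- A's loop from index j, when j + remaining length equals the total length N: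
-- spacing is added after every character except the last of the whole string.
theorem pv_loop_eq (cw sp : Int) (N : Nat) :
    ∀ (l : List Char) (j : Int) (acc : Int), l ≠ [] → j + l.length = (N : Int) →
      (PySem.List.enumerate l j).foldl
        (fun total p =>
          let total := total + pvCharWidthA p.2 cw
          if p.1 < (N : Int) - 1 then total + sp else total) acc
      = acc + (l.map (fun c => pvCharWidthA c cw)).sum + sp * ((l.length : Int) - 1) := by
  intro l
  induction l with
  | nil => intro j acc h; exact absurd rfl h
  | cons x xs ih =>
    intro j acc _ hlen
    rw [PySem.List.enumerate_cons]
    simp only [List.foldl_cons]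
    cases xs with
    | nil =>
      simp only [List.length_cons, List.length_nil] at hlen
      have hj : ¬ (j < (N : Int) - 1) := by push_cast at hlen; omega
      rw [PySem.List.enumerate_nil]
      simp [hj]
    | cons y ys =>
      have hne : (y :: ys) ≠ [] := by simp
      have hj : j < (N : Int) - 1 := by
        simp only [List.length_cons] at hlen; push_cast at hlen ⊢; omega
      have hlen' : (j + 1) + ((y :: ys).length : Int) = (N : Int) := by
        simp only [List.length_cons] at hlen ⊢; push_cast at hlen ⊢; omega
      rw [ih (j + 1) _ hne hlen']
      rw [if_pos hj]
      simp only [List.map_cons, List.sum_cons, List.length_cons]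
      push_cast
      ring

-- the counting decomposition: the per-character width sum equals
-- full width times length minus the counted deductions for the specials
theorem pv_sum_eq_counts (cw : Int) (l : List Char) :
    (l.map (fun c => pvCharWidthA c cw)).sum
      = cw * l.length
        - ((l.count ':' : Int) * (cw - PySem.Int.floordiv cw 2)
         + (l.count '.' : Int) * (cw - PySem.Int.floordiv cw 3)
         + (l.count '-' : Int) * (cw - PySem.Int.floordiv (cw * 2) 3)
         + (l.count '/' : Int) * (cw - PySem.Int.floordiv cw 2)
         + (l.count '°' : Int) * (cw - PySem.Int.floordiv cw 3)
         + (l.count '%' : Int) * (cw - cw)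
         + (l.count ' ' : Int) * (cw - PySem.Int.floordiv cw 2)) := by
  induction l with
  | nil => simp
  | cons x xs ih =>
    simp only [List.map_cons, List.sum_cons, ih, List.count_cons, List.length_cons]
    by_cases h1 : x = ':'
    · subst h1; simp [pvCharWidthA]; push_cast; ring
    by_cases h2 : x = '.'
    · subst h2; simp [pvCharWidthA]; push_cast; ring
    by_cases h3 : x = '-'
    · subst h3; simp [pvCharWidthA]; push_cast; ring
    by_cases h4 : x = '/'
    · subst h4; simp [pvCharWidthA]; push_cast; ring
    by_cases h5 : x = '°'
    · subst h5; simp [pvCharWidthA]; push_cast; ring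
    by_cases h6 : x = '%'
    · subst h6; simp [pvCharWidthA]; push_cast; ring
    by_cases h7 : x = ' '
    · subst h7; simp [pvCharWidthA]; push_cast; ring
    · have h1' : ¬ (':' = x) := fun e => h1 e.symm
      have h2' : ¬ ('.' = x) := fun e => h2 e.symm
      have h3' : ¬ ('-' = x) := fun e => h3 e.symm
      have h4' : ¬ ('/' = x) := fun e => h4 e.symm
      have h5' : ¬ ('°' = x) := fun e => h5 e.symm
      have h6' : ¬ ('%' = x) := fun e => h6 e.symm
      have h7' : ¬ (' ' = x) := fun e => h7 e.symm
      simp [pvCharWidthA, h1, h2, h3, h4, h5, h6, h7, h1', h2', h3', h4', h5', h6', h7']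
      push_cast; ring

-- ===== VERDICT =====
theorem get_string_width_spec : Claim_equal_get_string_width := by
  intro text cw sp _
  unfold Spec_get_string_width get_string_width get_string_width_alt
  by_cases h : text.toList = []
  · simp [h]
  · rw [if_neg h, if_neg h,
      pv_loop_eq cw sp text.toList.length text.toList 0 0 h (by simp),
      pv_sum_eq_counts]
    simp only [pvSpecials, List.foldl_cons, List.foldl_nil]
    ring
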